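-- pv_equiv track=rewrite | github.com/tjhrad/advent_of_code | 2018/day_20/solution.py | build_graph
-- ===== SOURCE A (Python) =====
-- from collections import deque, defaultdict
--
-- def build_graph(regex):
--     DIRECTIONS = {"N": (0, -1), "E": (1, 0), "S": (0, 1), "W": (-1, 0)}
--
--     if regex.startswith("^"): regex = regex[1:]
--     if regex.endswith("$"): regex = regex[:-1]
--
--     graph = defaultdict(set)
--     current_positions = {(0, 0)}
--     stack = []
--
--     for c in regex:
--         if c in "NESW":
--             next_positions = set()
--             dx, dy = DIRECTIONS[c]
--             for (x, y) in current_positions: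
--                 next_pos = (x + dx, y + dy)
--                 graph[(x, y)].add(next_pos)
--                 graph[next_pos].add((x, y))
--                 next_positions.add(next_pos)
--             current_positions = next_positions
--         elif c == "(":
--             stack.append((set(current_positions), []))
--         elif c == "|":
--             positions_before, alternatives = stack[-1]
--             alternatives.append(set(current_positions))
--             current_positions = set(positions_before)
--         elif c == ")":
--             positions_before, alternatives = stack.pop()
--             alternatives.append(set(current_positions))
--             new_positions = set().union(*alternatives)
--             current_positions = new_positions
--         else:
--             pass
--
--     return graph
-- ===== SOURCE B (Python) =====
-- from collections import defaultdict
--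
-- # Recursive-descent parser over the regex instead of A's explicit stack machine.
-- # On malformed input (a '|' or ')' outside any group), A raises IndexError; B
-- # just parses it as a (degenerate) group and returns a graph.
-- def build_graph(regex):
--     DIRECTIONS = {"N": (0, -1), "E": (1, 0), "S": (0, 1), "W": (-1, 0)}
--
--     if regex.startswith("^"): regex = regex[1:]
--     if regex.endswith("$"): regex = regex[:-1]
--
--     graph = defaultdict(set)
--
--     def group(i, entry):
--         # parse a group body starting at i until ')' or end of string;
--         # return (index just past the group, set of end positions)
--         alternatives = []
--         current = set(entry)
--         while i < len(regex):
--             c = regex[i]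
--             i += 1
--             if c in "NESW":
--                 dx, dy = DIRECTIONS[c]
--                 nxt = set()
--                 for (x, y) in current:
--                     np = (x + dx, y + dy)
--                     graph[(x, y)].add(np)
--                     graph[np].add((x, y))
--                     nxt.add(np)
--                 current = nxt
--             elif c == "(":
--                 i, current = group(i, current)
--             elif c == "|":
--                 alternatives.append(current)
--                 current = set(entry)
--             elif c == ")":
--                 alternatives.append(current)
--                 return i, set().union(*alternatives)
--         return i, current
--
--     group(0, {(0, 0)})
--     return graph
-- ===== Notes on version B (the rewrite author's own statement) =====
-- stated objective: alternative
-- what changed: Replaced A's single-pass scan with an explicit stack of (positions_before, alternatives) frames by a recursive-descent parser whose helper consumes one group body at a time, the call stack playing the role of A's explicit stack.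
-- outside the precondition, e.g. on build_graph('|'): A raises IndexError, B returns {}; on build_graph(')'): A raises IndexError, B returns {}
import Mathlib
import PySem

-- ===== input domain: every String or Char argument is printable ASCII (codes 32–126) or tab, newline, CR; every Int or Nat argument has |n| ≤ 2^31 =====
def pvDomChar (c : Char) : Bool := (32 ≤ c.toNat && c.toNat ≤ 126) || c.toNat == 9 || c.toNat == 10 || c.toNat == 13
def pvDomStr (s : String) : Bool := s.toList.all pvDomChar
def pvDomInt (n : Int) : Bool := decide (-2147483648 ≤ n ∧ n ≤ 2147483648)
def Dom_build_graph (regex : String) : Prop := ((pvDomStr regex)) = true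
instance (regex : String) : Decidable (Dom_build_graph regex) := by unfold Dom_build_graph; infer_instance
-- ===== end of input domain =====

-- B replaces A's explicit stack machine by a recursive-descent group parser; same graph, same cost (alternative decomposition, not faster).

-- ===== PORT A =====  (iterative scan; an explicit stack of (positions_before, alternatives) frames)

def pvDirA (c : Char) : Int × Int :=
  if c = 'N' then (0, -1) else if c = 'E' then (1, 0) else if c = 'S' then (0, 1) else (-1, 0)

-- the inner 'for (x, y) in current_positions' loop of a NESW step: defaultdict access = getD with empty set, then insert back
def pvMoveA (g : PySem.Dict (Int × Int) (PySem.Set (Int × Int))) (cur : PySem.Set (Int × Int)) (c : Char) :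
    PySem.Dict (Int × Int) (PySem.Set (Int × Int)) × PySem.Set (Int × Int) :=
  cur.foldl (fun acc xy =>
    let np : Int × Int := (xy.1 + (pvDirA c).1, xy.2 + (pvDirA c).2)
    let g1 := acc.1.insert xy (PySem.Set.add (acc.1.getD xy PySem.Set.empty) np)
    let g2 := g1.insert np (PySem.Set.add (g1.getD np PySem.Set.empty) xy)
    (g2, PySem.Set.add acc.2 np)) (g, PySem.Set.empty)

-- set().union(*alternatives)
def pvUnionA (l : List (PySem.Set (Int × Int))) : PySem.Set (Int × Int) :=
  l.foldl PySem.Set.union PySem.Set.empty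

-- one character of A's loop; 'none' = the IndexError A raises on stack[-1]/pop of an empty stack
def pvStepA
    (st : Option (PySem.Dict (Int × Int) (PySem.Set (Int × Int)) × PySem.Set (Int × Int) ×
                  List (PySem.Set (Int × Int) × List (PySem.Set (Int × Int)))) )
    (c : Char) :
    Option (PySem.Dict (Int × Int) (PySem.Set (Int × Int)) × PySem.Set (Int × Int) ×
            List (PySem.Set (Int × Int) × List (PySem.Set (Int × Int)))) :=
  match st with
  | none => none
  | some (g, cur, stack) =>
    if c = 'N' ∨ c = 'E' ∨ c = 'S' ∨ c = 'W' then
      some ((pvMoveA g cur c).1, (pvMoveA g cur c).2, stack)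
    else if c = '(' then
      some (g, cur, (cur, []) :: stack)
    else if c = '|' then
      match stack with
      | [] => none
      | (before, alts) :: rest => some (g, before, (before, alts ++ [cur]) :: rest)
    else if c = ')' then
      match stack with
      | [] => none
      | (_, alts) :: rest => some (g, pvUnionA (alts ++ [cur]), rest)
    else
      some (g, cur, stack)

-- regex[1:] after startswith('^'), regex[:-1] after endswith('$')
def pvStripA (regex : String) : List Char :=
  let cs := regex.toList
  let cs1 := if cs.head? = some '^' then cs.tail else cs
  if cs1.getLast? = some '$' then cs1.dropLast else cs1

def build_graph (regex : String) : List (Int × Int × List (Int × Int)) :=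
  match (pvStripA regex).foldl pvStepA
      (some (PySem.Dict.empty, PySem.Set.ofList [((0 : Int), (0 : Int))], [])) with
  | none => []   -- Python raises IndexError here; excluded by Pre_build_graph
  | some (g, _, _) => g.items.map (fun p => (p.1.1, p.1.2, p.2))

-- ===== PORT B =====  (recursive descent: one group body at a time, no explicit stack)

def pvDirB (c : Char) : Int × Int :=
  if c = 'N' then (0, -1) else if c = 'E' then (1, 0) else if c = 'S' then (0, 1) else (-1, 0)

def pvMoveB (g : PySem.Dict (Int × Int) (PySem.Set (Int × Int))) (cur : PySem.Set (Int × Int)) (c : Char) :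
    PySem.Dict (Int × Int) (PySem.Set (Int × Int)) × PySem.Set (Int × Int) :=
  cur.foldl (fun acc xy =>
    let np : Int × Int := (xy.1 + (pvDirB c).1, xy.2 + (pvDirB c).2)
    let g1 := acc.1.insert xy (PySem.Set.add (acc.1.getD xy PySem.Set.empty) np)
    let g2 := g1.insert np (PySem.Set.add (g1.getD np PySem.Set.empty) xy)
    (g2, PySem.Set.add acc.2 np)) (g, PySem.Set.empty)

def pvUnionB (l : List (PySem.Set (Int × Int))) : PySem.Set (Int × Int) :=
  l.foldl PySem.Set.union PySem.Set.empty

-- Source B's 'group': parse one group body until ')' or end of input; returns (rest of input, graph, end positions).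
-- The Nat argument is pure fuel (Python loops on a string index); length of the input list always suffices.
def pvWalkB :
    Nat → List Char →
    PySem.Dict (Int × Int) (PySem.Set (Int × Int)) →
    PySem.Set (Int × Int) → PySem.Set (Int × Int) → List (PySem.Set (Int × Int)) →
    List Char × PySem.Dict (Int × Int) (PySem.Set (Int × Int)) × PySem.Set (Int × Int)
  | 0, cs, g, _, cur, _ => (cs, g, cur)
  | Nat.succ _, [], g, _, cur, _ => ([], g, cur)
  | Nat.succ f, c :: cs, g, entry, cur, alts =>
    if c = 'N' ∨ c = 'E' ∨ c = 'S' ∨ c = 'W' then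
      pvWalkB f cs (pvMoveB g cur c).1 entry (pvMoveB g cur c).2 alts
    else if c = '(' then
      pvWalkB f (pvWalkB f cs g cur cur []).1 (pvWalkB f cs g cur cur []).2.1 entry
        (pvWalkB f cs g cur cur []).2.2 alts
    else if c = '|' then
      pvWalkB f cs g entry entry (alts ++ [cur])
    else if c = ')' then
      (cs, g, pvUnionB (alts ++ [cur]))
    else
      pvWalkB f cs g entry cur alts

def pvStripB (regex : String) : List Char :=
  let cs := regex.toList
  let cs1 := if cs.head? = some '^' then cs.tail else cs
  if cs1.getLast? = some '$' then cs1.dropLast else cs1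

def build_graph_alt (regex : String) : List (Int × Int × List (Int × Int)) :=
  let cs := pvStripB regex
  let r := pvWalkB cs.length cs PySem.Dict.empty
    (PySem.Set.ofList [((0 : Int), (0 : Int))]) (PySem.Set.ofList [((0 : Int), (0 : Int))]) []
  r.2.1.items.map (fun p => (p.1.1, p.1.2, p.2))

-- ===== PRECONDITION & SPEC =====

-- balanced-parenthesis scan: every '|' and ')' of the stripped regex must sit inside an open group
def pvOkScan : Nat → List Char → Bool
  | _, [] => true
  | d, c :: cs =>
    if c = '(' then pvOkScan (d + 1) cs
    else if c = ')' then decide (0 < d) && pvOkScan (d - 1) cs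
    else if c = '|' then decide (0 < d) && pvOkScan d cs
    else pvOkScan d cs

def pvStripPre (regex : String) : List Char :=
  let cs := regex.toList
  let cs1 := if cs.head? = some '^' then cs.tail else cs
  if cs1.getLast? = some '$' then cs1.dropLast else cs1

-- Pre_ excludes exactly the inputs on which A raises IndexError: a '|' or ')' outside any group.
def Pre_build_graph (regex : String) : Prop := pvOkScan 0 (pvStripPre regex) = true
instance (regex : String) : Decidable (Pre_build_graph regex) := by unfold Pre_build_graph; infer_instance

def pvWitness_build_graph : String := "^N(E|W(N|))S$"

def Spec_build_graph (regex : String) (out : List (Int × Int × List (Int × Int))) : Prop := out = build_graph_alt regex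
instance (regex : String) (out : List (Int × Int × List (Int × Int))) : Decidable (Spec_build_graph regex out) := by unfold Spec_build_graph; infer_instance

-- ===== CLAIM (what is proved, stated in full; the proofs are below) =====
def Claim_equal_build_graph : Prop := ∀ (regex : String), Dom_build_graph regex → Pre_build_graph regex → Spec_build_graph regex (build_graph regex)

-- ===== LEMMAS AND PROOFS =====

lemma pvMove_eq : pvMoveA = pvMoveB := rfl
lemma pvUnion_eq : pvUnionA = pvUnionB := rfl

lemma pvWalkB_nil (f : Nat) (g : PySem.Dict (Int × Int) (PySem.Set (Int × Int)))
    (entry cur : PySem.Set (Int × Int)) (alts : List (PySem.Set (Int × Int))) :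
    pvWalkB f [] g entry cur alts = ([], g, cur) := by
  cases f <;> simp [pvWalkB]

-- core simulation: inside one frame, B's group parser tracks A's stack machine.
lemma pv_sim (f : Nat) :
    ∀ (cs : List Char) (d : Nat) g entry cur (alts : List (PySem.Set (Int × Int)))
      (stack : List (PySem.Set (Int × Int) × List (PySem.Set (Int × Int)))),
      cs.length ≤ f → pvOkScan (d + 1) cs = true →
      (((pvWalkB f cs g entry cur alts).1 = [] ∧ ∃ st,
          List.foldl pvStepA (some (g, cur, (entry, alts) :: stack)) cs =
            some ((pvWalkB f cs g entry cur alts).2.1, (pvWalkB f cs g entry cur alts).2.2, st))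
       ∨ ((pvWalkB f cs g entry cur alts).1.length < cs.length ∧
          pvOkScan d (pvWalkB f cs g entry cur alts).1 = true ∧
          List.foldl pvStepA (some (g, cur, (entry, alts) :: stack)) cs =
            List.foldl pvStepA
              (some ((pvWalkB f cs g entry cur alts).2.1, (pvWalkB f cs g entry cur alts).2.2, stack))
              (pvWalkB f cs g entry cur alts).1)) := by
  induction f with
  | zero =>
    intro cs d g entry cur alts stack hlen _
    have hnil : cs = [] := List.eq_nil_of_length_eq_zero (Nat.le_zero.mp hlen)
    subst hnil
    exact Or.inl ⟨rfl, ⟨(entry, alts) :: stack, rfl⟩⟩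
  | succ f ih =>
    intro cs d g entry cur alts stack hlen hok
    match cs with
    | [] =>
      rw [pvWalkB_nil]
      exact Or.inl ⟨rfl, ⟨(entry, alts) :: stack, rfl⟩⟩
    | c :: cs =>
      have hlen' : cs.length ≤ f := by simp only [List.length_cons] at hlen; omega
      by_cases hN : c = 'N' ∨ c = 'E' ∨ c = 'S' ∨ c = 'W'
      · have ew : pvWalkB (Nat.succ f) (c :: cs) g entry cur alts =
            pvWalkB f cs (pvMoveB g cur c).1 entry (pvMoveB g cur c).2 alts := by
          simp only [pvWalkB, if_pos hN]
        have es : pvStepA (some (g, cur, (entry, alts) :: stack)) c =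
            some ((pvMoveA g cur c).1, (pvMoveA g cur c).2, (entry, alts) :: stack) := by
          simp only [pvStepA, if_pos hN]
        have hok' : pvOkScan (d + 1) cs = true := by
          rcases hN with rfl | rfl | rfl | rfl <;> simpa [pvOkScan] using hok
        rw [ew, List.foldl_cons, es, pvMove_eq]
        rcases ih cs d (pvMoveB g cur c).1 entry (pvMoveB g cur c).2 alts stack hlen' hok' with
          h | ⟨h1, h2, h3⟩
        · exact Or.inl h
        · exact Or.inr ⟨by simp only [List.length_cons]; omega, h2, h3⟩
      · by_cases hP : c = '('
        · subst hP
          have hok' : pvOkScan (d + 2) cs = true := by simpa [pvOkScan] using hok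
          have ew : pvWalkB (Nat.succ f) ('(' :: cs) g entry cur alts =
              pvWalkB f (pvWalkB f cs g cur cur []).1 (pvWalkB f cs g cur cur []).2.1 entry
                (pvWalkB f cs g cur cur []).2.2 alts := by
            simp only [pvWalkB]
            rw [if_neg hN]; simp
          have es : pvStepA (some (g, cur, (entry, alts) :: stack)) '(' =
              some (g, cur, (cur, []) :: (entry, alts) :: stack) := by
            simp only [pvStepA]
            rw [if_neg hN]; simp
          rcases ih cs (d + 1) g cur cur [] ((entry, alts) :: stack) hlen' hok' with
            ⟨hnil, st', hfold⟩ | ⟨hl, hok2, hfold⟩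
          · rw [ew, hnil, pvWalkB_nil]
            exact Or.inl ⟨rfl, ⟨st', by rw [List.foldl_cons, es]; exact hfold⟩⟩
          · rcases ih (pvWalkB f cs g cur cur []).1 d (pvWalkB f cs g cur cur []).2.1 entry
              (pvWalkB f cs g cur cur []).2.2 alts stack (le_of_lt (lt_of_lt_of_le hl hlen')) hok2 with
              ⟨h1, st', h2⟩ | ⟨h1, h2, h3⟩
            · rw [ew]
              exact Or.inl ⟨h1, ⟨st', by rw [List.foldl_cons, es, hfold]; exact h2⟩⟩
            · rw [ew]
              refine Or.inr ⟨?_, h2, by rw [List.foldl_cons, es, hfold]; exact h3⟩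
              simp only [List.length_cons]; omega
        · by_cases hB : c = '|'
          · subst hB
            have hok' : pvOkScan (d + 1) cs = true := by simpa [pvOkScan] using hok
            have ew : pvWalkB (Nat.succ f) ('|' :: cs) g entry cur alts =
                pvWalkB f cs g entry entry (alts ++ [cur]) := by
              simp only [pvWalkB]
              rw [if_neg hN, if_neg hP]; simp
            have es : pvStepA (some (g, cur, (entry, alts) :: stack)) '|' =
                some (g, entry, (entry, alts ++ [cur]) :: stack) := by
              simp only [pvStepA]
              rw [if_neg hN, if_neg hP]; simp
            rw [ew, List.foldl_cons, es]
            rcases ih cs d g entry entry (alts ++ [cur]) stack hlen' hok' with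
              h | ⟨h1, h2, h3⟩
            · exact Or.inl h
            · exact Or.inr ⟨by simp only [List.length_cons]; omega, h2, h3⟩
          · by_cases hC : c = ')'
            · subst hC
              have hok' : pvOkScan d cs = true := by simpa [pvOkScan] using hok
              have ew : pvWalkB (Nat.succ f) (')' :: cs) g entry cur alts =
                  (cs, g, pvUnionB (alts ++ [cur])) := by
                simp only [pvWalkB]
                rw [if_neg hN, if_neg hP, if_neg hB]; simp
              have es : pvStepA (some (g, cur, (entry, alts) :: stack)) ')' =
                  some (g, pvUnionA (alts ++ [cur]), stack) := by
                simp only [pvStepA]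
                rw [if_neg hN, if_neg hP, if_neg hB]; simp
              rw [ew]
              refine Or.inr ⟨by simp, hok', ?_⟩
              rw [List.foldl_cons, es, pvUnion_eq]
            · have hok' : pvOkScan (d + 1) cs = true := by
                simpa [pvOkScan, hP, hB, hC] using hok
              have ew : pvWalkB (Nat.succ f) (c :: cs) g entry cur alts =
                  pvWalkB f cs g entry cur alts := by
                simp only [pvWalkB]
                rw [if_neg hN, if_neg hP, if_neg hB, if_neg hC]
              have es : pvStepA (some (g, cur, (entry, alts) :: stack)) c =
                  some (g, cur, (entry, alts) :: stack) := by
                simp only [pvStepA]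
                rw [if_neg hN, if_neg hP, if_neg hB, if_neg hC]
              rw [ew, List.foldl_cons, es]
              rcases ih cs d g entry cur alts stack hlen' hok' with h | ⟨h1, h2, h3⟩
              · exact Or.inl h
              · exact Or.inr ⟨by simp only [List.length_cons]; omega, h2, h3⟩

lemma pv_simTop (f : Nat) :
    ∀ (cs : List Char) g entry cur (alts : List (PySem.Set (Int × Int))),
      cs.length ≤ f → pvOkScan 0 cs = true →
      ∃ cur' st,
        List.foldl pvStepA (some (g, cur, [])) cs =
          some ((pvWalkB f cs g entry cur alts).2.1, cur', st) := by
  induction f with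
  | zero =>
    intro cs g entry cur alts hlen _
    have hnil : cs = [] := List.eq_nil_of_length_eq_zero (Nat.le_zero.mp hlen)
    subst hnil
    exact ⟨cur, [], rfl⟩
  | succ f ih =>
    intro cs g entry cur alts hlen hok
    match cs with
    | [] => rw [pvWalkB_nil]; exact ⟨cur, [], rfl⟩
    | c :: cs =>
      have hlen' : cs.length ≤ f := by simp only [List.length_cons] at hlen; omega
      by_cases hN : c = 'N' ∨ c = 'E' ∨ c = 'S' ∨ c = 'W'
      · have ew : pvWalkB (Nat.succ f) (c :: cs) g entry cur alts =
            pvWalkB f cs (pvMoveB g cur c).1 entry (pvMoveB g cur c).2 alts := by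
          simp only [pvWalkB, if_pos hN]
        have es : pvStepA (some (g, cur, [])) c =
            some ((pvMoveA g cur c).1, (pvMoveA g cur c).2, []) := by
          simp only [pvStepA, if_pos hN]
        have hok' : pvOkScan 0 cs = true := by
          rcases hN with rfl | rfl | rfl | rfl <;> simpa [pvOkScan] using hok
        rw [ew, List.foldl_cons, es, pvMove_eq]
        exact ih cs (pvMoveB g cur c).1 entry (pvMoveB g cur c).2 alts hlen' hok'
      · by_cases hP : c = '('
        · subst hP
          have hok' : pvOkScan 1 cs = true := by simpa [pvOkScan] using hok
          have ew : pvWalkB (Nat.succ f) ('(' :: cs) g entry cur alts =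
              pvWalkB f (pvWalkB f cs g cur cur []).1 (pvWalkB f cs g cur cur []).2.1 entry
                (pvWalkB f cs g cur cur []).2.2 alts := by
            simp only [pvWalkB]
            rw [if_neg hN]; simp
          have es : pvStepA (some (g, cur, [])) '(' =
              some (g, cur, [(cur, [])]) := by
            simp only [pvStepA]
            rw [if_neg hN]; simp
          rcases pv_sim f cs 0 g cur cur [] [] hlen' hok' with
            ⟨hnil, st', hfold⟩ | ⟨hl, hok2, hfold⟩
          · rw [ew, hnil, pvWalkB_nil]
            exact ⟨(pvWalkB f cs g cur cur []).2.2, st', by rw [List.foldl_cons, es]; exact hfold⟩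
          · obtain ⟨cur', st, h⟩ := ih (pvWalkB f cs g cur cur []).1 (pvWalkB f cs g cur cur []).2.1
              entry (pvWalkB f cs g cur cur []).2.2 alts (le_of_lt (lt_of_lt_of_le hl hlen')) hok2
            rw [ew]
            exact ⟨cur', st, by rw [List.foldl_cons, es, hfold]; exact h⟩
        · by_cases hB : c = '|'
          · subst hB
            exact absurd hok (by simp [pvOkScan])
          · by_cases hC : c = ')'
            · subst hC
              exact absurd hok (by simp [pvOkScan])
            · have hok' : pvOkScan 0 cs = true := by
                simpa [pvOkScan, hP, hB, hC] using hok
              have ew : pvWalkB (Nat.succ f) (c :: cs) g entry cur alts =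
                  pvWalkB f cs g entry cur alts := by
                simp only [pvWalkB]
                rw [if_neg hN, if_neg hP, if_neg hB, if_neg hC]
              have es : pvStepA (some (g, cur, [])) c = some (g, cur, []) := by
                simp only [pvStepA]
                rw [if_neg hN, if_neg hP, if_neg hB, if_neg hC]
              rw [ew, List.foldl_cons, es]
              exact ih cs g entry cur alts hlen' hok'

-- ===== VERDICT (by name: the statement is the Claim_ definition above) =====
theorem build_graph_spec : Claim_equal_build_graph := by
  intro regex _ hpre
  unfold Spec_build_graph build_graph build_graph_alt
  obtain ⟨cur', st, h⟩ := pv_simTop (pvStripB regex).length (pvStripB regex) PySem.Dict.empty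
    (PySem.Set.ofList [((0 : Int), (0 : Int))]) (PySem.Set.ofList [((0 : Int), (0 : Int))]) []
    le_rfl hpre
  have hA : pvStripA regex = pvStripB regex := rfl
  rw [hA, h]
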